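-- pv_equiv track=rewrite | github.com/MomenMorgan/alx-higher_level_programming | 0x03-python-data_structures/10-divisible_by_2.py | divisible_by_2
-- ===== SOURCE A (Python) =====
-- def divisible_by_2(my_list=[]):
--     new_lis = []
--
--     for i in range(len(my_list)):
--         if i % 2 == 0:
--             new_lis.append(True)
--
--         else:
--             new_lis.append(False)
--     return new_lis
-- ===== SOURCE B (Python) =====
-- def divisible_by_2(my_list=[]):
--     n = len(my_list)
--     return ([True, False] * ((n + 1) // 2))[:n]
-- ===== Notes on version B (the rewrite author's own statement) =====
-- stated objective: simpler
-- what changed: Replaces the per-index loop with parity test by a closed-form construction: repeat the [True, False] pattern (n+1)//2 times and slice to length n.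
import Mathlib
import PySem

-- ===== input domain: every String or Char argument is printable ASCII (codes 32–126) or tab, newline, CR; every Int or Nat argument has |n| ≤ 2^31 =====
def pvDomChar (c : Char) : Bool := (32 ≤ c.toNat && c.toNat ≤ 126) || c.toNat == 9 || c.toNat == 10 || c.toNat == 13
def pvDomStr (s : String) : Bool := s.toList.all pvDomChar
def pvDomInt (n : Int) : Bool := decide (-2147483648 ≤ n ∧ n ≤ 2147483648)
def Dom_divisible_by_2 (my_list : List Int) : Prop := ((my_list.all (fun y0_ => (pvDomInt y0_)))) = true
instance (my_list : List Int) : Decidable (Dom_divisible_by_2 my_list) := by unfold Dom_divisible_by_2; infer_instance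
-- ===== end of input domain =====

-- B builds the alternating True/False pattern in closed form (repeat + slice) instead of A's per-index loop with a parity test; same value for every list.

-- ===== PORT A =====
-- for i in range(len(my_list)): if i % 2 == 0: append True else append False
def divisible_by_2 (my_list : List Int) : List Bool :=
  (PySem.List.pyRange 0 (my_list.length : Int) 1).foldl
    (fun new_lis i =>
      if PySem.Int.mod i 2 == 0 then new_lis ++ [true] else new_lis ++ [false]) []

-- ===== PORT B =====
-- n = len(my_list); return ([True, False] * ((n + 1) // 2))[:n]
def divisible_by_2_alt (my_list : List Int) : List Bool :=
  let n : Int := my_list.length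
  PySem.List.slice ((List.replicate (PySem.Int.floordiv (n + 1) 2).toNat [true, false]).flatten)
    none (some n)

-- ===== PRECONDITION & SPEC =====
def Spec_divisible_by_2 (my_list : List Int) (out : List Bool) : Prop := out = divisible_by_2_alt my_list
instance (my_list : List Int) (out : List Bool) : Decidable (Spec_divisible_by_2 my_list out) := by unfold Spec_divisible_by_2; infer_instance

-- ===== CLAIM (what is proved, stated in full; the proofs are below) =====
def Claim_equal_divisible_by_2 : Prop := ∀ (my_list : List Int), Dom_divisible_by_2 my_list → Spec_divisible_by_2 my_list (divisible_by_2 my_list)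

-- ===== LEMMAS AND PROOFS =====

-- the common value: alternating pattern of length n
def pvPattern (n : Nat) : List Bool := (List.range n).map (fun k => decide (k % 2 = 0))

lemma pvPattern_step (n : Nat) : pvPattern (n + 2) = true :: false :: pvPattern n := by
  simp only [pvPattern, List.range_succ_eq_map, List.map_map, Function.comp_def, List.map_cons]
  norm_num
  intro a _
  omega

-- A side: the fold over range n produces acc ++ pvPattern n
lemma pvA_fold (m : Nat) : ∀ (acc : List Bool),
    (PySem.List.pyRange 0 (m : Int) 1).foldl
      (fun new_lis i =>
        if PySem.Int.mod i 2 == 0 then new_lis ++ [true] else new_lis ++ [false]) acc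
    = acc ++ pvPattern m := by
  induction m with
  | zero =>
    intro acc
    rw [PySem.List.pyRange_one_eq_nil (by omega)]
    simp [pvPattern]
  | succ m ih =>
    intro acc
    have hc : ((m + 1 : Nat) : Int) = (m : Int) + 1 := by push_cast; ring
    rw [hc, PySem.List.pyRange_one_succ_right (by omega), List.foldl_append, ih]
    have hmod : PySem.Int.mod ((m : Nat) : Int) 2 = ((m % 2 : Nat) : Int) :=
      PySem.Int.mod_natCast m 2
    by_cases h : m % 2 = 0 <;>
      simp only [pvPattern, List.range_succ, List.map_append, List.map_cons, List.map_nil,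
        hmod, h, List.append_assoc] <;> norm_num <;> omega

lemma pvA_eq (my_list : List Int) : divisible_by_2 my_list = pvPattern my_list.length := by
  unfold divisible_by_2
  rw [pvA_fold]
  simp

-- B side: taking n of the repeated pattern gives pvPattern n
lemma pvB_take : ∀ n : Nat,
    List.take n ((List.replicate ((n + 1) / 2) [true, false]).flatten) = pvPattern n := by
  intro n
  induction n using Nat.strong_induction_on with
  | _ n ih =>
    match n with
    | 0 => simp [pvPattern]
    | 1 => simp [pvPattern]
    | (m + 2) =>
      have h2 : (m + 2 + 1) / 2 = (m + 1) / 2 + 1 := by omega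
      rw [h2, List.replicate_succ, List.flatten_cons]
      show List.take (m + 2) ([true, false] ++ _) = _
      rw [pvPattern_step, ← ih m (by omega)]
      simp [List.take_succ_cons]

lemma pvB_eq (my_list : List Int) : divisible_by_2_alt my_list = pvPattern my_list.length := by
  show PySem.List.slice
      ((List.replicate (PySem.Int.floordiv ((my_list.length : Int) + 1) 2).toNat
        [true, false]).flatten) none (some (my_list.length : Int)) = _
  have hfd : PySem.Int.floordiv ((my_list.length : Int) + 1) 2
      = (((my_list.length + 1) / 2 : Nat) : Int) := by
    have := PySem.Int.floordiv_natCast (my_list.length + 1) 2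
    simpa using this
  rw [hfd, PySem.List.slice_to_natCast]
  simpa using pvB_take my_list.length

-- ===== VERDICT (by name: the statement is the Claim_ definition above) =====
theorem divisible_by_2_spec : Claim_equal_divisible_by_2 := by
  intro my_list _
  unfold Spec_divisible_by_2
  rw [pvA_eq, pvB_eq]
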